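-- pv_equiv track=rewrite | github.com/nltoan/yelling-frog | webcrawler/extractors/content.py | find_exact_duplicates
-- ===== SOURCE A (Python) =====
-- from typing import Dict, List, Optional, Any, Set
--
-- def find_exact_duplicates(urls_data: Dict[str, Dict[str, Any]]) -> Dict[str, List[str]]:
--     """
--     Find exact duplicate content (same hash)
--
--     Args:
--         urls_data: Dict mapping URL -> {hash, ...}
--
--     Returns:
--         Dict mapping hash -> list of URLs with that hash
--     """
--     hash_to_urls = {}
--
--     for url, data in urls_data.items():
--         content_hash = data.get('hash')
--         if content_hash:
--             if content_hash not in hash_to_urls: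
--                 hash_to_urls[content_hash] = []
--             hash_to_urls[content_hash].append(url)
--
--     # Filter to only duplicates (more than 1 URL per hash)
--     duplicates = {h: urls for h, urls in hash_to_urls.items() if len(urls) > 1}
--
--     return duplicates
-- ===== SOURCE B (Python) =====
-- def find_exact_duplicates(urls_data):
--     """
--     Find exact duplicate content (same hash) — two-pass counting version.
--
--     Pass 1 counts how many URLs carry each truthy hash; pass 2 emits only the
--     URLs whose hash is shared, so no post-filtering of the grouping is needed.
--     """
--     counts = {}
--     for data in urls_data.values():
--         content_hash = data.get('hash')
--         if content_hash:
--             counts[content_hash] = counts.get(content_hash, 0) + 1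
--
--     duplicates = {}
--     for url, data in urls_data.items():
--         content_hash = data.get('hash')
--         if content_hash and counts[content_hash] > 1:
--             duplicates.setdefault(content_hash, []).append(url)
--     return duplicates
-- ===== Notes on version B (the rewrite author's own statement) =====
-- stated objective: alternative
-- what changed: Replaces the build-full-groups-then-filter pass (group every URL by hash, then comprehension-filter groups of size > 1) with a count-first strategy: pass 1 only counts occurrences of each hash, pass 2 appends a URL to the output only when its hash is already known to be shared, so the filtering comprehension and the temporary full grouping disappear.
import Mathlib
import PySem

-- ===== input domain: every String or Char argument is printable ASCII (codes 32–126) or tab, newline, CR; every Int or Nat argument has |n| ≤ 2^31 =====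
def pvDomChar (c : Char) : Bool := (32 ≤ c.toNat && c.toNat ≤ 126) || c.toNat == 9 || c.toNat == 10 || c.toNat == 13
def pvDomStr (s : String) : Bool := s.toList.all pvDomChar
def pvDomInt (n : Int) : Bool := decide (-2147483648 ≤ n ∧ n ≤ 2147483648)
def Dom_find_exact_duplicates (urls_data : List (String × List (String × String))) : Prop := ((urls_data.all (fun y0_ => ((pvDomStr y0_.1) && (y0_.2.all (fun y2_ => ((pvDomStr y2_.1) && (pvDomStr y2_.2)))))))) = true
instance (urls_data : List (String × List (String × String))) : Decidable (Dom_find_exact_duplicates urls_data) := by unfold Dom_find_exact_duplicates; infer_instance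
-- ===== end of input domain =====

-- B replaces A's group-everything-then-filter pass by a count-first two-pass scan (no full
-- grouping, no post-filter comprehension); same results, same cost class (objective: alternative).

-- data.get('hash') on the inner dict (an association list encoding a Python dict)
def pvGetHash (data : List (String × String)) : Option String :=
  (PySem.Dict.ofList data).get? "hash"

-- ===== PORT A =====
def find_exact_duplicates (urls_data : List (String × List (String × String))) : List (String × List String) :=
  let hash_to_urls : PySem.Dict String (List String) :=
    urls_data.foldl (fun d p =>
      match pvGetHash p.2 with
      | none => d
      | some content_hash =>
        if content_hash = "" then d
        else
          -- 'if content_hash not in hash_to_urls: hash_to_urls[content_hash] = []' then append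
          (if d.contains content_hash = false then d.insert content_hash [] else d).modify
            content_hash [] (fun l => l ++ [p.1])) PySem.Dict.empty
  -- {h: urls for h, urls in hash_to_urls.items() if len(urls) > 1}: the comprehension dict's
  -- items are exactly the filtered items (the keys of hash_to_urls are distinct)
  hash_to_urls.items.filter (fun q => decide (q.2.length > 1))

-- ===== PORT B =====
def find_exact_duplicates_alt (urls_data : List (String × List (String × String))) : List (String × List String) :=
  let counts : PySem.Dict String Int :=
    urls_data.foldl (fun c p =>
      match pvGetHash p.2 with
      | none => c
      | some content_hash =>
        if content_hash = "" then c
        else c.insert content_hash (c.getD content_hash 0 + 1)) PySem.Dict.empty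
  let duplicates : PySem.Dict String (List String) :=
    urls_data.foldl (fun d p =>
      match pvGetHash p.2 with
      | none => d
      | some content_hash =>
        if content_hash = "" then d
        else if counts.getD content_hash 0 > 1 then
          -- duplicates.setdefault(content_hash, []).append(url)
          d.modify content_hash [] (fun l => l ++ [p.1])
        else d) PySem.Dict.empty
  duplicates.items

-- ===== PRECONDITION & SPEC =====
def Spec_find_exact_duplicates (urls_data : List (String × List (String × String))) (out : List (String × List String)) : Prop := out = find_exact_duplicates_alt urls_data
instance (urls_data : List (String × List (String × String))) (out : List (String × List String)) : Decidable (Spec_find_exact_duplicates urls_data out) := by unfold Spec_find_exact_duplicates; infer_instance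

-- ===== CLAIM (what is proved, stated in full; the proofs are below) =====
def Claim_equal_find_exact_duplicates : Prop := ∀ (urls_data : List (String × List (String × String))), Dom_find_exact_duplicates urls_data → Spec_find_exact_duplicates urls_data (find_exact_duplicates urls_data)

-- ===== LEMMAS AND PROOFS =====

-- the (hash, url) pairs of the entries with a truthy hash, in entry order
def pvPairs (l : List (String × List (String × String))) : List (String × String) :=
  l.filterMap (fun p =>
    match pvGetHash p.2 with
    | none => none
    | some h => if h = "" then none else some (h, p.1))

-- every loop of either port is a fold over exactly those pairs
lemma pv_foldl_pairs {σ : Type} (l : List (String × List (String × String)))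
    (f : σ → String × String → σ) (init : σ) :
    l.foldl (fun s p =>
      match pvGetHash p.2 with
      | none => s
      | some h => if h = "" then s else f s (h, p.1)) init
    = (pvPairs l).foldl f init := by
  induction l generalizing init with
  | nil => rfl
  | cons p t ih =>
    simp only [pvPairs, List.filterMap_cons, List.foldl_cons] at *
    cases hg : pvGetHash p.2 with
    | none => simpa using ih init
    | some h =>
      by_cases hh : h = "" <;> simp [hh] <;> exact ih _

-- A's insert-empty-then-append step is the single modify step
lemma pv_stepA (d : PySem.Dict String (List String)) (h u : String) :
    (if d.contains h = false then d.insert h [] else d).modify h [] (fun l => l ++ [u])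
    = d.modify h [] (fun l => l ++ [u]) := by
  by_cases hc : d.contains h = false
  · simp [hc, PySem.Dict.modify, PySem.Dict.getD_insert_self,
      PySem.Dict.insert_insert_self, PySem.Dict.getD_of_not_contains _ _ hc]
  · simp [hc]

-- A's grouping loop, written over pvPairs
lemma pv_foldA (u : List (String × List (String × String))) :
    u.foldl (fun d p =>
      match pvGetHash p.2 with
      | none => d
      | some content_hash =>
        if content_hash = "" then d
        else
          (if d.contains content_hash = false then d.insert content_hash [] else d).modify
            content_hash [] (fun l => l ++ [p.1]))
      (PySem.Dict.empty : PySem.Dict String (List String))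
    = (pvPairs u).foldl (fun d x => d.modify x.1 [] (fun l => l ++ [x.2])) PySem.Dict.empty := by
  simp only [pv_stepA]
  exact pv_foldl_pairs u (fun d x => d.modify x.1 [] (fun l => l ++ [x.2])) PySem.Dict.empty

-- B's counting loop, written over pvPairs
lemma pv_foldC (u : List (String × List (String × String))) :
    u.foldl (fun c p =>
      match pvGetHash p.2 with
      | none => c
      | some content_hash =>
        if content_hash = "" then c
        else c.insert content_hash (c.getD content_hash 0 + 1))
      (PySem.Dict.empty : PySem.Dict String Int)
    = (pvPairs u).foldl (fun c x => c.insert x.1 (c.getD x.1 0 + 1)) PySem.Dict.empty :=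
  pv_foldl_pairs u
    (fun (c : PySem.Dict String Int) x => c.insert x.1 (c.getD x.1 0 + 1)) PySem.Dict.empty

-- B's emitting loop, written over pvPairs (c0 = the fixed counts dict)
lemma pv_foldB (u : List (String × List (String × String))) (c0 : PySem.Dict String Int) :
    u.foldl (fun d p =>
      match pvGetHash p.2 with
      | none => d
      | some content_hash =>
        if content_hash = "" then d
        else if c0.getD content_hash 0 > 1 then
          d.modify content_hash [] (fun l => l ++ [p.1])
        else d)
      (PySem.Dict.empty : PySem.Dict String (List String))
    = (pvPairs u).foldl
        (fun d x => if c0.getD x.1 0 > 1 then d.modify x.1 [] (fun l => l ++ [x.2]) else d)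
        PySem.Dict.empty :=
  pv_foldl_pairs u
    (fun d x => if c0.getD x.1 0 > 1 then d.modify x.1 [] (fun l => l ++ [x.2]) else d)
    PySem.Dict.empty

-- a guarded fold is a fold over the filtered list
lemma pv_foldl_guard {σ : Type} (p : String × String → Prop) [DecidablePred p]
    (f : σ → String × String → σ) (l : List (String × String)) (init : σ) :
    l.foldl (fun s x => if p x then f s x else s) init
    = (l.filter (fun x => decide (p x))).foldl f init := by
  induction l generalizing init with
  | nil => rfl
  | cons x t ih =>
    by_cases hx : p x <;> simp [hx] <;> exact ih _

-- items of the grouping fold, in closed form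
lemma pv_group_items (ws : List (String × String)) :
    (ws.foldl (fun d p => d.modify p.1 [] (fun l => l ++ [p.2]))
      (PySem.Dict.empty : PySem.Dict String (List String))).items
    = (PySem.Set.ofList (ws.map Prod.fst)).map
        (fun h => (h, (ws.filter (fun q => q.1 == h)).map (fun q => q.2))) := by
  have hnd : (ws.foldl (fun d p => d.modify p.1 [] (fun l => l ++ [p.2]))
      (PySem.Dict.empty : PySem.Dict String (List String))).keys.Nodup :=
    PySem.Dict.nodup_keys_foldl_modify_key ws Prod.fst [] (fun _ p => (fun l => l ++ [p.2]))
      PySem.Dict.empty (by simp [PySem.Dict.keys_empty])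
  rw [PySem.Dict.items_eq_map_keys _ hnd [],
      PySem.Dict.keys_foldl_modify_key ws Prod.fst [] (fun _ p => (fun l => l ++ [p.2])),
      PySem.Dict.keys_empty, PySem.Set.update_nil_left]
  refine List.map_congr_left ?_
  intro h _
  rw [PySem.Dict.getD_foldl_modify_append]
  simp [PySem.Dict.getD_empty]

-- set(…) commutes with a filter
lemma pv_ofList_filter (q : String → Bool) (l : List String) :
    PySem.Set.ofList (l.filter q) = (PySem.Set.ofList l).filter q := by
  induction l with
  | nil => rfl
  | cons x t ih =>
    rw [List.filter_cons]
    by_cases hx : q x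
    · rw [if_pos hx, PySem.Set.ofList_cons, PySem.Set.ofList_cons, ih]
      have hstep : List.filter q (x :: (PySem.Set.ofList t).discard x)
          = x :: List.filter q ((PySem.Set.ofList t).discard x) := by
        simp [hx]
      rw [hstep]
      simp only [PySem.Set.discard]
      rw [List.filter_comm]
    · rw [if_neg (by simp [hx]), PySem.Set.ofList_cons, ih]
      have hstep : List.filter q (x :: (PySem.Set.ofList t).discard x)
          = List.filter q ((PySem.Set.ofList t).discard x) := by
        simp [hx]
      rw [hstep]
      simp only [PySem.Set.discard]
      rw [List.filter_comm]
      symm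
      rw [List.filter_eq_self]
      intro a ha
      rcases List.mem_filter.mp ha with ⟨-, hq⟩
      simp only [Bool.not_eq_true', beq_eq_false_iff_ne, ne_eq]
      intro h'
      rw [h'] at hq
      exact absurd hq (by simp [hx])

-- the per-hash URL-list length is the hash's multiplicity
lemma pv_len_eq_count (xs : List (String × String)) (h : String) :
    ((xs.filter (fun q => q.1 == h)).map (fun q => q.2)).length
    = (xs.map Prod.fst).count h := by
  rw [List.length_map, ← List.countP_eq_length_filter, List.count_eq_countP, List.countP_map]
  rfl

theorem pv_main (u : List (String × List (String × String))) :
    find_exact_duplicates u = find_exact_duplicates_alt u := by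
  simp only [find_exact_duplicates, find_exact_duplicates_alt, pv_foldA, pv_foldC, pv_foldB]
  have hcount : ∀ a : String,
      ((pvPairs u).foldl (fun c x => c.insert x.1 (c.getD x.1 0 + 1))
        (PySem.Dict.empty : PySem.Dict String Int)).getD a 0
      = (((pvPairs u).map Prod.fst).count a : Int) := by
    intro a
    have h := PySem.Dict.getD_foldl_insert_add_one ((pvPairs u).map Prod.fst) PySem.Dict.empty a
    rw [List.foldl_map] at h
    simpa [PySem.Dict.getD_empty] using h
  simp only [hcount, gt_iff_lt, Nat.one_lt_cast]
  have hguard : List.foldl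
        (fun (d : PySem.Dict String (List String)) (x : String × String) =>
          if 1 < List.count x.1 (List.map Prod.fst (pvPairs u)) then
            d.modify x.1 [] (fun l => l ++ [x.2])
          else d)
        PySem.Dict.empty (pvPairs u)
      = List.foldl (fun d x => d.modify x.1 [] (fun l => l ++ [x.2])) PySem.Dict.empty
          ((pvPairs u).filter
            (fun x => decide (1 < List.count x.1 (List.map Prod.fst (pvPairs u))))) :=
    pv_foldl_guard _ _ _ _
  rw [hguard]
  rw [pv_group_items, pv_group_items]
  rw [List.filter_map]
  have hks : ((pvPairs u).filter
        (fun x => decide (1 < ((pvPairs u).map Prod.fst).count x.1))).map Prod.fst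
      = ((pvPairs u).map Prod.fst).filter
          (fun h => decide (1 < ((pvPairs u).map Prod.fst).count h)) := by
    rw [List.filter_map]
    exact congrArg _ (List.filter_congr (fun a _ => rfl))
  rw [hks, pv_ofList_filter]
  have hpred : (PySem.Set.ofList ((pvPairs u).map Prod.fst)).filter
        ((fun q : String × List String => decide (q.2.length > 1)) ∘
          (fun h => (h, ((pvPairs u).filter (fun q => q.1 == h)).map (fun q => q.2))))
      = (PySem.Set.ofList ((pvPairs u).map Prod.fst)).filter
          (fun h => decide (1 < ((pvPairs u).map Prod.fst).count h)) := by
    refine List.filter_congr ?_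
    intro h _
    simp only [Function.comp_apply, pv_len_eq_count, gt_iff_lt]
  rw [hpred]
  refine List.map_congr_left ?_
  intro h hm
  have hpop : 1 < ((pvPairs u).map Prod.fst).count h := by
    rcases List.mem_filter.mp hm with ⟨-, hq⟩
    exact of_decide_eq_true hq
  have hfil : ((pvPairs u).filter
        (fun x => decide (1 < ((pvPairs u).map Prod.fst).count x.1))).filter
        (fun q => q.1 == h)
      = (pvPairs u).filter (fun q => q.1 == h) := by
    rw [List.filter_comm, List.filter_eq_self.mpr]
    intro a ha
    rcases List.mem_filter.mp ha with ⟨-, hq⟩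
    have : a.1 = h := by simpa using hq
    simp [this, hpop]
  rw [hfil]

-- ===== VERDICT (by name: the statement is the Claim_ definition above) =====
theorem find_exact_duplicates_spec : Claim_equal_find_exact_duplicates := by
  intro u _
  exact pv_main u
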